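-- pv_equiv track=rewrite | github.com/CuongMDev/VietnamMathReasoning | utils.py | extract_boxed
-- ===== SOURCE A (Python) =====
-- def extract_boxed(s: str):
--     start = s.rfind(r"\boxed{")
--     if start == -1:
--         return ""
--
--     start += len(r"\boxed{")
--     depth = 1
--     i = start
--     while i < len(s) and depth > 0:
--         if s[i] == "{":
--             depth += 1
--         elif s[i] == "}":
--             depth -= 1
--         i += 1
--     content = s[start:i-1].strip()
--     return content
-- ===== SOURCE B (Python) =====
-- def extract_boxed(s: str):
--     PAT = "\\boxed{"
--     n = len(s)
--     start = -1     # content start of the most recently seen \boxed{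
--     end = -1       # index of its matching '}', -1 while unclosed
--     target = 0     # brace depth just before that \boxed{
--     depth = 0
--     i = 0
--     while i < n:
--         if s.startswith(PAT, i):
--             start = i + len(PAT)
--             end = -1
--             target = depth
--             depth += 1
--             i += len(PAT)
--         else:
--             c = s[i]
--             if c == "{":
--                 depth += 1
--             elif c == "}":
--                 depth -= 1
--                 if start != -1 and end == -1 and depth == target:
--                     end = i
--             i += 1
--     if start == -1:
--         return ""
--     if end == -1:
--         return s[start:].strip()
--     return s[start:end].strip()
-- ===== Notes on version B (the rewrite author's own statement) =====
-- stated objective: alternative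
-- what changed: B replaces rfind-then-local-rescan by a single left-to-right pass that keeps a running brace depth and the content start/recorded depth of the most recently seen \boxed{, capturing the closing brace on the fly.
-- intended difference: On strings whose last \boxed{ is never closed and whose remaining content is nonempty and does not end in whitespace, A returns the content with its final character dropped (an off-by-one: content = s[start:i-1] with i already at end of string) while B returns the full stripped content, which is the intended value. — e.g. on extract_boxed("\\boxed{ab"): A returns "a", B returns "ab"
import Mathlib
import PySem

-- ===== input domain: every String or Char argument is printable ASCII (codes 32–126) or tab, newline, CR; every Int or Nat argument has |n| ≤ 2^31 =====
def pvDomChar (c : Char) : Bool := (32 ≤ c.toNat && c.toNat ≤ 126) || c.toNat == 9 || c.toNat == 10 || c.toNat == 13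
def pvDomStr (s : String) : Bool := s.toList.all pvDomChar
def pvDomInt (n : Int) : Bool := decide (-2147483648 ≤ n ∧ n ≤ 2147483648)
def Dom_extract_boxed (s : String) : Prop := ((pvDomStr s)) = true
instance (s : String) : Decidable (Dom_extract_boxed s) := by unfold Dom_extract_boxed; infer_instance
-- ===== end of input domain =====

-- B is a one-pass scanner (running brace depth + bookkeeping for the latest "\boxed{") instead of
-- A's rfind-then-rescan; on an unterminated last "\boxed{", B returns the full stripped content
-- where A drops the final character (see D_ below).

-- the literal r"\boxed{" (7 characters), shared constant
def pvPat : List Char := ['\\', 'b', 'o', 'x', 'e', 'd', '{']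

-- ===== PORT A =====
-- the while loop of A: number of characters consumed scanning at the given depth
def loopA : List Char → Int → Nat
  | [], _ => 0
  | c :: rest, depth =>
    if 0 < depth then
      1 + loopA rest (if c = '{' then depth + 1 else if c = '}' then depth - 1 else depth)
    else 0

def extract_boxed (s : String) : String :=
  let start0 := PySem.Str.rfind s "\\boxed{"
  if start0 = -1 then ""
  else
    let start := start0 + 7
    let i : Int := start + (loopA (s.toList.drop start.toNat) 1 : Nat)
    PySem.Str.strip (PySem.Str.slice s (some start) (some (i - 1)))

-- ===== PORT B =====
-- the while loop of B; state is (start, end, target), i the current index, depth the running depth.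
-- fuel is only a totality guard: the loop advances i every step, so fuel = length suffices.
def loopB : Nat → List Char → Nat → Int → Int × Int × Int → Int × Int × Int
  | 0, _, _, _, st => st
  | _ + 1, [], _, _, st => st
  | fuel + 1, c :: rest, i, depth, (start, e, target) =>
    if pvPat.isPrefixOf (c :: rest) then
      loopB fuel ((c :: rest).drop 7) (i + 7) (depth + 1) (((i : Int) + 7), -1, depth)
    else if c = '{' then
      loopB fuel rest (i + 1) (depth + 1) (start, e, target)
    else if c = '}' then
      loopB fuel rest (i + 1) (depth - 1)
        (start, if start ≠ -1 ∧ e = -1 ∧ depth - 1 = target then (i : Int) else e, target)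
    else loopB fuel rest (i + 1) depth (start, e, target)

def extract_boxed_alt (s : String) : String :=
  let r := loopB s.toList.length s.toList 0 0 (-1, -1, 0)
  if r.1 = -1 then ""
  else if r.2.1 = -1 then PySem.Str.strip (PySem.Str.slice s (some r.1) none)
  else PySem.Str.strip (PySem.Str.slice s (some r.1) (some r.2.1))

-- ===== PRECONDITION & SPEC =====
-- On strings whose last \boxed{ is never closed and whose remaining content is nonempty and does
-- not end in whitespace, A returns the content with its final character dropped (off-by-one:
-- s[start:i-1] with i already at the end of the string) while B returns the full stripped
-- content, which is the intended value.
def D_extract_boxed (s : String) : Prop :=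
  '\\' ∈ s.toList ∧
  (let r := PySem.Str.rfind s "\\boxed{"
   let tail := s.toList.drop (r.toNat + 7)
   0 ≤ r ∧ tail.getLast?.all PySem.Chars.isspace = false ∧
   ∀ k ≤ tail.length, (tail.take k).count '}' ≤ (tail.take k).count '{')
instance (s : String) : Decidable (D_extract_boxed s) := by unfold D_extract_boxed; infer_instance

def Spec_extract_boxed (s : String) (out : String) : Prop := ¬ D_extract_boxed s → out = extract_boxed_alt s
instance (s : String) (out : String) : Decidable (Spec_extract_boxed s out) := by unfold Spec_extract_boxed; infer_instance

def pvDiffWitness_extract_boxed : String := "\\boxed{ab"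
def pvDiffWitnessOut_extract_boxed : String × String := ("a", "ab")

-- ===== CLAIM (what is proved, stated in full; the proofs are below) =====
def Claim_unchanged_extract_boxed : Prop := ∀ (s : String), Dom_extract_boxed s → Spec_extract_boxed s (extract_boxed s)
def Claim_changed_extract_boxed : Prop := Dom_extract_boxed (pvDiffWitness_extract_boxed) ∧ D_extract_boxed (pvDiffWitness_extract_boxed) ∧ extract_boxed (pvDiffWitness_extract_boxed) = pvDiffWitnessOut_extract_boxed.1 ∧ extract_boxed_alt (pvDiffWitness_extract_boxed) = pvDiffWitnessOut_extract_boxed.2 ∧ pvDiffWitnessOut_extract_boxed.1 ≠ pvDiffWitnessOut_extract_boxed.2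
def Claim_exact_extract_boxed : Prop := ∀ (s : String), Dom_extract_boxed s → D_extract_boxed s → extract_boxed s ≠ extract_boxed_alt s

-- ===== LEMMAS AND PROOFS =====

-- index of the first character that brings the relative brace depth down to 0, if any
def firstClose : List Char → Int → Option Nat
  | [], _ => none
  | c :: rest, rel =>
    let rel' := if c = '{' then rel + 1 else if c = '}' then rel - 1 else rel
    if rel' ≤ 0 then some 0 else (firstClose rest rel').map (· + 1)

-- no occurrence of pvPat anywhere in t
def NoOcc (t : List Char) : Prop := ∀ j : Nat, pvPat.isPrefixOf (t.drop j) = false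

lemma noOcc_cons {c : Char} {rest : List Char} (h : NoOcc (c :: rest)) : NoOcc rest := by
  intro j; have := h (j + 1); simpa using this

-- ---- characterisation of rfind ----
lemma rfind_go_mem (s : List Char) (k : Nat) :
    PySem.Chars.rfind.go s pvPat k = -1 ∨
    ∃ p : Nat, p ≤ k ∧ PySem.Chars.rfind.go s pvPat k = (p : Int) ∧
      pvPat.isPrefixOf (s.drop p) = true ∧
      ∀ j : Nat, p < j → j ≤ k → pvPat.isPrefixOf (s.drop j) = false := by
  induction k with
  | zero =>
    cases h : pvPat.isPrefixOf s
    · left; simp [PySem.Chars.rfind.go, h]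
    · right
      refine ⟨0, le_refl _, ?_, by simpa using h, ?_⟩
      · simp [PySem.Chars.rfind.go, h]
      · intro j hj hj0; omega
  | succ k ih =>
    cases h : pvPat.isPrefixOf (s.drop (k + 1))
    case true =>
      right
      refine ⟨k + 1, le_refl _, ?_, h, ?_⟩
      · simp [PySem.Chars.rfind.go, h]
      · intro j hj hj'; omega
    case false =>
      have hf : pvPat.isPrefixOf (s.drop (k + 1)) = false := h
      have hstep : PySem.Chars.rfind.go s pvPat (k + 1) = PySem.Chars.rfind.go s pvPat k := by
        simp [PySem.Chars.rfind.go, hf]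
      rcases ih with hneg | ⟨p, hpk, heq, hpre, hmax⟩
      · left; rw [hstep]; exact hneg
      · right
        refine ⟨p, by omega, by rw [hstep]; exact heq, hpre, ?_⟩
        intro j hj hj'
        rcases Nat.lt_or_ge j (k + 1) with h' | h'
        · exact hmax j hj (by omega)
        · have hjk : j = k + 1 := by omega
          rw [hjk]; exact hf

lemma rfind_go_neg (s : List Char) (k : Nat) (h : PySem.Chars.rfind.go s pvPat k = -1) :
    ∀ j : Nat, j ≤ k → pvPat.isPrefixOf (s.drop j) = false := by
  induction k with
  | zero =>
    intro j hj
    have hj0 : j = 0 := by omega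
    subst hj0
    cases hpre : pvPat.isPrefixOf s
    · simpa using hpre
    · exfalso; simp [PySem.Chars.rfind.go, hpre] at h
  | succ k ih =>
    cases hpre : pvPat.isPrefixOf (s.drop (k + 1))
    case true =>
      exfalso
      rw [show PySem.Chars.rfind.go s pvPat (k + 1) = ((k + 1 : Nat) : Int) by
        simp [PySem.Chars.rfind.go, hpre]] at h
      omega
    case false =>
      have hstep : PySem.Chars.rfind.go s pvPat (k + 1) = PySem.Chars.rfind.go s pvPat k := by
        simp [PySem.Chars.rfind.go, hpre]
      rw [hstep] at h
      intro j hj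
      rcases Nat.lt_or_ge j (k + 1) with h' | h'
      · exact ih h j (by omega)
      · have hjk : j = k + 1 := by omega
        rw [hjk]; exact hpre

lemma noPrefix_of_ge (s : List Char) (j : Nat) (hj : s.length ≤ j) :
    pvPat.isPrefixOf (s.drop j) = false := by
  rw [List.drop_eq_nil_of_le hj]; decide

-- ---- loopA vs firstClose ----
lemma loopA_nonpos (t : List Char) (rel : Int) (h : rel ≤ 0) : loopA t rel = 0 := by
  cases t with
  | nil => rfl
  | cons c rest => simp [loopA]; omega

lemma loopA_eq_firstClose (t : List Char) (rel : Int) (h : 0 < rel) :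
    loopA t rel = (match firstClose t rel with
      | some k => k + 1
      | none => t.length) := by
  induction t generalizing rel with
  | nil => simp [loopA, firstClose]
  | cons c rest ih =>
    rw [loopA, firstClose]
    rw [if_pos h]
    set rel' := if c = '{' then rel + 1 else if c = '}' then rel - 1 else rel with hrel'
    by_cases hle : rel' ≤ 0
    · rw [if_pos hle, loopA_nonpos rest rel' hle]
    · rw [if_neg hle]
      rw [ih rel' (by omega)]
      cases hfc : firstClose rest rel' with
      | none => show 1 + rest.length = rest.length + 1; omega
      | some v => show 1 + (v + 1) = (v + 1) + 1; omega

-- ---- firstClose = none is the closed-form unbalanced-brace condition of D_ ----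
lemma firstClose_none_iff : ∀ (t : List Char) (rel : Int), 0 < rel →
    (firstClose t rel = none ↔
      ∀ k : Nat, k ≤ t.length →
        (((t.take k).count '}' : Int)) < rel + ((t.take k).count '{' : Int)) := by
  intro t
  induction t with
  | nil =>
    intro rel hrel
    constructor
    · intro _ k hk
      have hk0 : k = 0 := by simpa using hk
      subst hk0; simpa using hrel
    · intro _; rfl
  | cons c rest ih =>
    intro rel hrel
    rw [firstClose]
    set rel' := if c = '{' then rel + 1 else if c = '}' then rel - 1 else rel with hrel'
    by_cases hle : rel' ≤ 0
    · rw [if_pos hle]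
      constructor
      · intro h; simp at h
      · intro hcnt
        exfalso
        have h1 := hcnt 1 (by simp)
        rw [show (c :: rest).take 1 = [c] from rfl] at h1
        by_cases hc1 : c = '{' <;> by_cases hc2 : c = '}' <;>
          simp [hc1, hc2, hrel'] at h1 hle ⊢ <;> omega
    · rw [if_neg hle]
      rw [show ((firstClose rest rel').map (· + 1) = none) ↔ (firstClose rest rel' = none) from by
        cases firstClose rest rel' <;> simp]
      rw [ih rel' (by omega)]
      constructor
      · intro h k hk
        cases k with
        | zero => simpa using hrel
        | succ k =>
          have h2 := h k (by simpa using hk)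
          rw [show (c :: rest).take (k + 1) = c :: rest.take k from rfl]
          by_cases hc1 : c = '{' <;> by_cases hc2 : c = '}' <;>
            simp [hc1, hc2, hrel'] at h2 hle ⊢ <;> omega
      · intro h k hk
        have h2 := h (k + 1) (by simpa using hk)
        rw [show (c :: rest).take (k + 1) = c :: rest.take k from rfl] at h2
        by_cases hc1 : c = '{' <;> by_cases hc2 : c = '}' <;>
          simp [hc1, hc2, hrel'] at h2 hle ⊢ <;> omega

lemma firstClose_one_iff (t : List Char) : firstClose t 1 = none ↔
    ∀ k ≤ t.length, (t.take k).count '}' ≤ (t.take k).count '{' := by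
  rw [firstClose_none_iff t 1 (by omega)]
  constructor <;> (intro h k hk; have := h k hk; omega)

-- ---- no overlapping occurrences ----
lemma no_overlap (l : List Char) (j p : Nat)
    (hj : pvPat.isPrefixOf (l.drop j) = true) (hp : pvPat.isPrefixOf (l.drop p) = true)
    (h1 : j < p) (h2 : p < j + 7) : False := by
  rw [List.isPrefixOf_iff_prefix] at hj hp
  have hpv : l[p]? = some '\\' := by
    rcases hp with ⟨r, hr⟩
    have : (l.drop p)[0]? = some '\\' := by rw [← hr]; rfl
    rw [List.getElem?_drop] at this; simpa using this
  rcases hj with ⟨r, hr⟩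
  have hpj : (List.drop j l)[p - j]? = l[p]? := by
    rw [List.getElem?_drop]; congr 1; omega
  rw [← hr] at hpj
  have hlt : p - j < pvPat.length := by simp [pvPat]; omega
  rw [List.getElem?_append_left hlt, hpv] at hpj
  obtain ⟨m, hmeq⟩ : ∃ m, p - j = m := ⟨_, rfl⟩
  rw [hmeq] at hpj
  have h1m : 1 ≤ m := by omega
  have h2m : m ≤ 6 := by omega
  interval_cases m <;> exact absurd hpj (by decide)

-- ---- loopB equations and fuel irrelevance ----
lemma loopB_nil (f : Nat) (i : Nat) (d : Int) (st : Int × Int × Int) :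
    loopB f [] i d st = st := by cases f <;> rfl

lemma loopB_cons (f : Nat) (c : Char) (rest : List Char) (i : Nat) (d : Int)
    (start e target : Int) :
    loopB (f + 1) (c :: rest) i d (start, e, target) =
      if pvPat.isPrefixOf (c :: rest) then
        loopB f ((c :: rest).drop 7) (i + 7) (d + 1) (((i : Int) + 7), -1, d) else
      if c = '{' then loopB f rest (i + 1) (d + 1) (start, e, target) else
      if c = '}' then loopB f rest (i + 1) (d - 1)
        (start, if start ≠ -1 ∧ e = -1 ∧ d - 1 = target then (i : Int) else e, target)
      else loopB f rest (i + 1) d (start, e, target) := rfl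

lemma loopB_fuel : ∀ (f1 : Nat) (t : List Char) (f2 : Nat), t.length ≤ f1 → t.length ≤ f2 →
    ∀ (i : Nat) (d : Int) (st : Int × Int × Int), loopB f1 t i d st = loopB f2 t i d st := by
  intro f1
  induction f1 with
  | zero =>
    intro t f2 h1 h2 i d st
    have ht : t = [] := List.eq_nil_of_length_eq_zero (by omega)
    subst ht; exact (loopB_nil f2 i d st).symm
  | succ f1 ih =>
    intro t f2 h1 h2 i d st
    cases t with
    | nil => rw [loopB_nil, loopB_nil]
    | cons c rest =>
      cases f2 with
      | zero => simp at h2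
      | succ f2 =>
        obtain ⟨start, e, target⟩ := st
        rw [loopB_cons, loopB_cons]
        simp only [List.length_cons] at h1 h2
        by_cases hpre : pvPat.isPrefixOf (c :: rest) = true
        · rw [if_pos hpre, if_pos hpre]
          exact ih _ f2 (by simp; omega) (by simp; omega) _ _ _
        · rw [if_neg hpre, if_neg hpre]
          split_ifs <;> exact ih _ f2 (by omega) (by omega) _ _ _

-- ---- loopB stay lemmas ----
lemma loopB_stay_start : ∀ (t : List Char), NoOcc t →
    ∀ (f i : Nat) (d e tg : Int), loopB f t i d (-1, e, tg) = (-1, e, tg) := by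
  intro t
  induction t with
  | nil => intro _ f i d e tg; cases f <;> rfl
  | cons c rest ih =>
    intro hno f i d e tg
    cases f with
    | zero => rfl
    | succ f =>
      rw [loopB_cons]
      have hp : pvPat.isPrefixOf (c :: rest) = false := by simpa using hno 0
      rw [if_neg (by simp [hp])]
      split_ifs with h1 h2 h3
      · exact ih (noOcc_cons hno) f _ _ _ _
      · exact absurd h3.1 (by simp)
      · exact ih (noOcc_cons hno) f _ _ _ _
      · exact ih (noOcc_cons hno) f _ _ _ _

lemma loopB_stay_end : ∀ (t : List Char), NoOcc t →
    ∀ (f i : Nat) (d st e tg : Int), e ≠ -1 → loopB f t i d (st, e, tg) = (st, e, tg) := by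
  intro t
  induction t with
  | nil => intro _ f i d st e tg _; cases f <;> rfl
  | cons c rest ih =>
    intro hno f i d st e tg hne
    cases f with
    | zero => rfl
    | succ f =>
      rw [loopB_cons]
      have hp : pvPat.isPrefixOf (c :: rest) = false := by simpa using hno 0
      rw [if_neg (by simp [hp])]
      split_ifs with h1 h2 h3
      · exact ih (noOcc_cons hno) f _ _ _ _ _ hne
      · exact absurd h3.2.1 hne
      · exact ih (noOcc_cons hno) f _ _ _ _ _ hne
      · exact ih (noOcc_cons hno) f _ _ _ _ _ hne

-- ---- loopB on the suffix after the last pattern ----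
lemma loopB_suffix : ∀ (t : List Char), NoOcc t →
    ∀ (f : Nat), t.length ≤ f → ∀ (i : Nat) (d tg st0 : Int), tg < d → st0 ≠ -1 →
    loopB f t i d (st0, -1, tg) =
      (st0, (match firstClose t (d - tg) with
             | some k => ((i + k : Nat) : Int)
             | none => -1), tg) := by
  intro t
  induction t with
  | nil =>
    intro _ f _ i d tg st0 _ _
    rw [loopB_nil]; rfl
  | cons c rest ih =>
    intro hno f hf i d tg st0 hlt hst
    cases f with
    | zero => simp at hf
    | succ f =>
      rw [loopB_cons]
      have hp : pvPat.isPrefixOf (c :: rest) = false := by simpa using hno 0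
      rw [if_neg (by simp [hp])]
      simp only [List.length_cons] at hf
      rw [firstClose]
      by_cases hc1 : c = '{'
      · rw [if_pos hc1]
        rw [show (if c = '{' then d - tg + 1 else if c = '}' then d - tg - 1 else d - tg)
            = d + 1 - tg by rw [if_pos hc1]; ring]
        rw [if_neg (by omega : ¬ (d + 1 - tg ≤ 0))]
        rw [ih (noOcc_cons hno) f (by omega) (i + 1) (d + 1) tg st0 (by omega) hst]
        cases hk : firstClose rest (d + 1 - tg) with
        | none => rfl
        | some k =>
          simp only [Option.map_some]
          have har : i + 1 + k = i + (k + 1) := by omega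
          rw [har]
      · rw [if_neg hc1]
        by_cases hc2 : c = '}'
        · rw [if_pos hc2]
          rw [show (if c = '{' then d - tg + 1 else if c = '}' then d - tg - 1 else d - tg)
              = d - 1 - tg by rw [if_neg hc1, if_pos hc2]; ring]
          by_cases hcl : d - 1 = tg
          · rw [if_pos (⟨hst, rfl, hcl⟩ : st0 ≠ -1 ∧ (-1 : Int) = -1 ∧ d - 1 = tg)]
            rw [loopB_stay_end rest (noOcc_cons hno) f (i + 1) (d - 1) st0 (i : Int) tg (by omega)]
            rw [if_pos (by omega : d - 1 - tg ≤ 0)]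
            have har : (i : Nat) = i + 0 := by omega
            conv_lhs => rw [har]
          · rw [if_neg (by rintro ⟨-, -, h3⟩; exact hcl h3 :
                ¬ (st0 ≠ -1 ∧ (-1 : Int) = -1 ∧ d - 1 = tg))]
            rw [if_neg (by omega : ¬ (d - 1 - tg ≤ 0))]
            rw [ih (noOcc_cons hno) f (by omega) (i + 1) (d - 1) tg st0 (by omega) hst]
            cases hk : firstClose rest (d - 1 - tg) with
            | none => rfl
            | some k =>
              simp only [Option.map_some]
              have har : i + 1 + k = i + (k + 1) := by omega
              rw [har]
        · rw [if_neg hc2]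
          rw [show (if c = '{' then d - tg + 1 else if c = '}' then d - tg - 1 else d - tg)
              = d - tg by rw [if_neg hc1, if_neg hc2]]
          rw [if_neg (by omega : ¬ (d - tg ≤ 0))]
          rw [ih (noOcc_cons hno) f (by omega) (i + 1) d tg st0 (by omega) hst]
          cases hk : firstClose rest (d - tg) with
          | none => rfl
          | some k =>
            simp only [Option.map_some]
            have har : i + 1 + k = i + (k + 1) := by omega
            rw [har]

-- ---- the left-to-right scan reaches the last occurrence ----
lemma loopB_reach (l : List Char) (p : Nat)
    (hp : pvPat.isPrefixOf (l.drop p) = true)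
    (hlast : ∀ q : Nat, p < q → pvPat.isPrefixOf (l.drop q) = false) :
    ∀ (n j : Nat), p - j ≤ n → j ≤ p → ∀ (f : Nat), (l.drop j).length ≤ f →
      ∀ (d : Int) (st : Int × Int × Int),
      ∃ d' : Int, loopB f (l.drop j) j d st =
        loopB (l.drop (p + 7)).length (l.drop (p + 7)) (p + 7) (d' + 1) (((p : Int) + 7), -1, d') := by
  have hplt : p < l.length := by
    by_contra hge
    rw [noPrefix_of_ge l p (by omega)] at hp; exact absurd hp (by simp)
  intro n
  induction n with
  | zero =>
    intro j hn hj f hf d st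
    have hjp : j = p := by omega
    subst hjp
    obtain ⟨f, rfl⟩ : ∃ g, f = g + 1 := ⟨f - 1, by
      have : 0 < (l.drop j).length := by simp; omega
      omega⟩
    obtain ⟨start, e, target⟩ := st
    have hcons : l.drop j = l[j] :: l.drop (j + 1) := List.drop_eq_getElem_cons (by omega)
    rw [hcons, loopB_cons, ← hcons, if_pos hp]
    rw [show (l.drop j).drop 7 = l.drop (j + 7) by rw [List.drop_drop]]
    refine ⟨d, ?_⟩
    exact loopB_fuel f (l.drop (j + 7)) (l.drop (j + 7)).length
      (by simp [List.length_drop] at hf ⊢; omega) (le_refl _) _ _ _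
  | succ n ih =>
    intro j hn hj f hf d st
    by_cases hjp : j = p
    · exact ih j (by omega) (by omega) f hf d st
    · have hjlt : j < p := by omega
      obtain ⟨f, rfl⟩ : ∃ g, f = g + 1 := ⟨f - 1, by
        have : 0 < (l.drop j).length := by simp; omega
        omega⟩
      obtain ⟨start, e, target⟩ := st
      have hcons : l.drop j = l[j] :: l.drop (j + 1) := List.drop_eq_getElem_cons (by omega)
      rw [hcons, loopB_cons, ← hcons]
      by_cases hpre : pvPat.isPrefixOf (l.drop j) = true
      · rw [if_pos hpre]
        have h7 : j + 7 ≤ p := by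
          by_contra hlt7
          exact no_overlap l j p hpre hp hjlt (by omega)
        rw [show (l.drop j).drop 7 = l.drop (j + 7) by rw [List.drop_drop]]
        exact ih (j + 7) (by omega) h7 f (by simp [List.length_drop] at hf ⊢; omega) _ _
      · rw [if_neg hpre]
        have hstep : ∀ (d' : Int) (st' : Int × Int × Int),
            ∃ d'' : Int, loopB f (l.drop (j + 1)) (j + 1) d' st' =
              loopB (l.drop (p + 7)).length (l.drop (p + 7)) (p + 7) (d'' + 1) (((p : Int) + 7), -1, d'') := by
          intro d' st'
          exact ih (j + 1) (by omega) (by omega) f (by simp [List.length_drop] at hf ⊢; omega) d' st'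
        split_ifs <;> exact hstep _ _

-- ---- strip lemmas ----
lemma rstrip_append_ws (y : List Char) (c : Char) (h : PySem.Chars.isspace c = true) :
    PySem.Chars.rstrip (y ++ [c]) = PySem.Chars.rstrip y := by
  simp [PySem.Chars.rstrip, h]

lemma strip_append_ws (x : List Char) (c : Char) (h : PySem.Chars.isspace c = true) :
    PySem.Chars.strip (x ++ [c]) = PySem.Chars.strip x := by
  simp only [PySem.Chars.strip, PySem.Chars.lstrip, List.dropWhile_append]
  cases he : (List.dropWhile PySem.Chars.isspace x).isEmpty
  · simp only [Bool.false_eq_true, if_false]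
    exact rstrip_append_ws _ c h
  · rw [List.isEmpty_iff] at he
    simp [he, h, List.dropWhile]

lemma rstrip_append_nonws (y : List Char) (c : Char) (h : PySem.Chars.isspace c = false) :
    PySem.Chars.rstrip (y ++ [c]) = y ++ [c] := by
  simp [PySem.Chars.rstrip, h]

lemma rstrip_length_le (y : List Char) : (PySem.Chars.rstrip y).length ≤ y.length := by
  simpa [PySem.Chars.rstrip] using List.length_dropWhile_le _ y.reverse

lemma strip_append_nonws (x : List Char) (c : Char) (h : PySem.Chars.isspace c = false) :
    PySem.Chars.strip (x ++ [c]) ≠ PySem.Chars.strip x := by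
  intro heq
  have hlen := congrArg List.length heq
  rw [PySem.Chars.strip, PySem.Chars.strip, PySem.Chars.lstrip, PySem.Chars.lstrip,
    List.dropWhile_append] at hlen
  by_cases he : (List.dropWhile PySem.Chars.isspace x).isEmpty
  · rw [List.isEmpty_iff] at he
    simp [he, h, PySem.Chars.rstrip] at hlen
  · rw [if_neg (by simp_all)] at hlen
    rw [rstrip_append_nonws _ c h] at hlen
    have := rstrip_length_le (List.dropWhile PySem.Chars.isspace x)
    simp at hlen
    omega

-- ---- shared case analysis for the verdicts ----
lemma rfind_str (s : String) :
    PySem.Str.rfind s "\\boxed{" = PySem.Chars.rfind.go s.toList pvPat s.toList.length := by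
  rw [PySem.Str.rfind_eq]
  rw [show ("\\boxed{" : String).toList = pvPat from by decide]
  rfl

lemma hmax_all (l : List Char) (p : Nat)
    (hmax0 : ∀ j : Nat, p < j → j ≤ l.length → pvPat.isPrefixOf (l.drop j) = false) :
    ∀ q : Nat, p < q → pvPat.isPrefixOf (l.drop q) = false := by
  intro q hq
  rcases Nat.lt_or_ge l.length q with h' | h'
  · exact noPrefix_of_ge _ _ (by omega)
  · exact hmax0 q hq (by omega)

-- both results in the unterminated case: A keeps all but the last character, B keeps all
lemma values_unterminated (s : String) (p : Nat)
    (hpre : pvPat.isPrefixOf (s.toList.drop p) = true)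
    (hmax : ∀ q : Nat, p < q → pvPat.isPrefixOf (s.toList.drop q) = false)
    (heq : PySem.Chars.rfind.go s.toList pvPat s.toList.length = (p : Int))
    (hfc : firstClose (s.toList.drop (p + 7)) 1 = none)
    (hmt : s.toList.drop (p + 7) ≠ []) :
    (extract_boxed s).toList = PySem.Chars.strip ((s.toList.drop (p + 7)).dropLast) ∧
    (extract_boxed_alt s).toList = PySem.Chars.strip (s.toList.drop (p + 7)) := by
  have hplt : p < s.toList.length := by
    by_contra hge
    rw [noPrefix_of_ge _ _ (by omega)] at hpre; exact absurd hpre (by simp)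
  have hp7 : p + 7 ≤ s.toList.length := by
    rw [List.isPrefixOf_iff_prefix] at hpre
    have h1 := hpre.length_le
    simp only [List.length_drop, pvPat, List.length_cons, List.length_nil] at h1
    omega
  have hm1 : 1 ≤ (s.toList.drop (p + 7)).length := by
    rcases List.exists_cons_of_ne_nil hmt with ⟨c, cs, hcc⟩
    rw [hcc]; simp
  constructor
  · -- A's value
    simp only [extract_boxed]
    rw [rfind_str, heq]
    rw [if_neg (by omega : ¬ ((p : Nat) : Int) = -1)]
    rw [show ((p : Int) + 7).toNat = p + 7 from by omega]
    rw [loopA_eq_firstClose (s.toList.drop (p + 7)) 1 (by omega), hfc]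
    rw [show (match (none : Option Nat) with
          | some k => k + 1
          | none => (s.toList.drop (p + 7)).length) = (s.toList.drop (p + 7)).length from rfl]
    simp only [PySem.Str.toList_strip, PySem.Str.toList_slice, PySem.Chars.slice_eq_listSlice]
    rw [show ((p : Int) + 7) = ((p + 7 : Nat) : Int) from by omega]
    rw [show ((p + 7 : Nat) : Int) + ((s.toList.drop (p + 7)).length : Int) - 1
          = ((p + 7 + ((s.toList.drop (p + 7)).length - 1) : Nat) : Int) from by omega]
    rw [PySem.List.slice_natCast]
    rw [show p + 7 + ((s.toList.drop (p + 7)).length - 1) - (p + 7)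
          = (s.toList.drop (p + 7)).length - 1 from by omega]
    rw [← List.dropLast_eq_take]
  · -- B's value
    have hnoTail : NoOcc (s.toList.drop (p + 7)) := by
      intro j; rw [List.drop_drop]
      exact hmax (p + 7 + j) (by omega)
    obtain ⟨d', hB⟩ := loopB_reach s.toList p hpre hmax p 0 (by omega) (by omega)
        s.toList.length (by simp) 0 (-1, -1, 0)
    rw [List.drop_zero] at hB
    have hsux := loopB_suffix (s.toList.drop (p + 7)) hnoTail (s.toList.drop (p + 7)).length
        (le_refl _) (p + 7) (d' + 1) d' ((p : Int) + 7) (by omega) (by omega)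
    rw [show (d' + 1 : Int) - d' = 1 from by ring, hfc] at hsux
    rw [hsux] at hB
    simp only [extract_boxed_alt]
    rw [hB]
    rw [if_neg (by omega : ¬ ((p : Int) + 7) = -1), if_pos rfl]
    simp only [PySem.Str.toList_strip, PySem.Str.toList_slice, PySem.Chars.slice_eq_listSlice]
    rw [show ((p : Int) + 7) = ((p + 7 : Nat) : Int) from by omega]
    rw [PySem.List.slice_from_natCast]

-- ===== VERDICT (by name: the statement is the Claim_ definition above) =====
theorem extract_boxed_spec : Claim_unchanged_extract_boxed := by
  intro s _
  unfold Spec_extract_boxed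
  intro hnd
  rcases rfind_go_mem s.toList s.toList.length with hneg | ⟨p, hpk, heq, hpre, hmax0⟩
  · -- no occurrence at all: A returns "", B's state never changes
    have hno : NoOcc s.toList := by
      intro j
      rcases Nat.lt_or_ge s.toList.length j with hj | hj
      · exact noPrefix_of_ge _ _ (by omega)
      · exact rfind_go_neg _ _ hneg j (by omega)
    simp only [extract_boxed, extract_boxed_alt]
    rw [rfind_str, hneg, if_pos rfl]
    rw [loopB_stay_start s.toList hno _ _ _ _ _]
    rfl
  · -- the last occurrence is at p
    have hmax := hmax_all s.toList p hmax0
    have hplt : p < s.toList.length := by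
      by_contra hge
      rw [noPrefix_of_ge _ _ (by omega)] at hpre; exact absurd hpre (by simp)
    have hp7 : p + 7 ≤ s.toList.length := by
      rw [List.isPrefixOf_iff_prefix] at hpre
      have h1 := hpre.length_le
      simp only [List.length_drop, pvPat, List.length_cons, List.length_nil] at h1
      omega
    have hnoTail : NoOcc (s.toList.drop (p + 7)) := by
      intro j; rw [List.drop_drop]
      exact hmax (p + 7 + j) (by omega)
    obtain ⟨d', hB⟩ := loopB_reach s.toList p hpre hmax p 0 (by omega) (by omega)
        s.toList.length (by simp) 0 (-1, -1, 0)
    rw [List.drop_zero] at hB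
    have hsux := loopB_suffix (s.toList.drop (p + 7)) hnoTail (s.toList.drop (p + 7)).length
        (le_refl _) (p + 7) (d' + 1) d' ((p : Int) + 7) (by omega) (by omega)
    rw [show (d' + 1 : Int) - d' = 1 from by ring] at hsux
    rw [hsux] at hB
    simp only [extract_boxed, extract_boxed_alt]
    rw [rfind_str, heq]
    rw [if_neg (by omega : ¬ ((p : Nat) : Int) = -1)]
    rw [hB]
    rw [show ((p : Int) + 7).toNat = p + 7 from by omega]
    rw [loopA_eq_firstClose (s.toList.drop (p + 7)) 1 (by omega)]
    cases hfc : firstClose (s.toList.drop (p + 7)) 1 with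
    | some k =>
      -- the box closes at absolute index p+7+k: both sides slice [p+7, p+7+k)
      rw [if_neg (by omega : ¬ ((p : Int) + 7) = -1)]
      rw [if_neg (by omega : ¬ (((p + 7 + k : Nat) : Int)) = -1)]
      show PySem.Str.strip (PySem.Str.slice s (some ((p : Int) + 7))
          (some ((p : Int) + 7 + ((k + 1 : Nat) : Int) - 1)))
        = PySem.Str.strip (PySem.Str.slice s (some ((p : Int) + 7)) (some ((p + 7 + k : Nat) : Int)))
      rw [show ((p : Int) + 7 + ((k + 1 : Nat) : Int) - 1) = ((p + 7 + k : Nat) : Int) from by omega]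
    | none =>
      -- the box never closes: A drops the final character, B takes the whole tail;
      -- ¬D_ says the tail is empty or ends in whitespace, so the strips agree
      rw [if_neg (by omega : ¬ ((p : Int) + 7) = -1), if_pos rfl]
      have hv : PySem.Str.rfind s "\\boxed{" = ((p : Nat) : Int) := by
        rw [rfind_str]; exact heq
      rw [D_extract_boxed] at hnd
      simp only [hv, Int.toNat_natCast] at hnd
      have hcc := (firstClose_one_iff (s.toList.drop (p + 7))).mp hfc
      have hmem : '\\' ∈ s.toList := by
        rw [List.isPrefixOf_iff_prefix] at hpre
        rcases hpre with ⟨r, hr⟩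
        have : '\\' ∈ s.toList.drop p := by rw [← hr]; simp [pvPat]
        exact List.mem_of_mem_drop this
      apply String.toList_inj.mp
      simp only [PySem.Str.toList_strip, PySem.Str.toList_slice, PySem.Chars.slice_eq_listSlice]
      by_cases hmt : s.toList.drop (p + 7) = []
      · rw [show ((p : Int) + 7) = ((p + 7 : Nat) : Int) from by omega]
        rw [hmt]
        rw [show ((p + 7 : Nat) : Int) + (([] : List Char).length : Int) - 1
              = ((p + 6 : Nat) : Int) from by simp; omega]
        rw [PySem.List.slice_natCast, PySem.List.slice_from_natCast]
        rw [hmt, show p + 6 - (p + 7) = 0 from by omega]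
        simp
      · have hm1 : 1 ≤ (s.toList.drop (p + 7)).length := by
          rcases List.exists_cons_of_ne_nil hmt with ⟨c, cs, hcc⟩
          rw [hcc]; simp
        obtain ⟨x, c, hxc⟩ : ∃ x c, s.toList.drop (p + 7) = x ++ [c] :=
          ⟨(s.toList.drop (p + 7)).dropLast, (s.toList.drop (p + 7)).getLast hmt,
            (List.dropLast_append_getLast hmt).symm⟩
        have hlast? : (s.toList.drop (p + 7)).getLast? = some c := by
          rw [hxc]; simp
        have hws : PySem.Chars.isspace c = true := by
          by_contra hcon
          refine hnd ⟨hmem, by omega, ?_, hcc⟩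
          rw [hlast?]
          simpa using eq_false_of_ne_true hcon
        rw [show ((p : Int) + 7) = ((p + 7 : Nat) : Int) from by omega]
        rw [show ((p + 7 : Nat) : Int) + ((s.toList.drop (p + 7)).length : Int) - 1
              = ((p + 7 + ((s.toList.drop (p + 7)).length - 1) : Nat) : Int) from by omega]
        rw [PySem.List.slice_natCast, PySem.List.slice_from_natCast]
        rw [show p + 7 + ((s.toList.drop (p + 7)).length - 1) - (p + 7)
              = (s.toList.drop (p + 7)).length - 1 from by omega]
        rw [← List.dropLast_eq_take]
        rw [hxc, List.dropLast_concat]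
        exact (strip_append_ws x c hws).symm

theorem extract_boxed_changed : Claim_changed_extract_boxed := by
  unfold Claim_changed_extract_boxed; decide

theorem extract_boxed_tight : Claim_exact_extract_boxed := by
  intro s _ hd heq2
  obtain ⟨-, hd2⟩ := hd
  rcases rfind_go_mem s.toList s.toList.length with hneg | ⟨p, hpk, heq, hpre, hmax0⟩
  · simp only [rfind_str, hneg] at hd2
    exact absurd hd2.1 (by omega)
  · have hmax := hmax_all s.toList p hmax0
    simp only [rfind_str, heq, Int.toNat_natCast] at hd2
    obtain ⟨-, hall, hcc⟩ := hd2
    have hfc : firstClose (s.toList.drop (p + 7)) 1 = none :=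
      (firstClose_one_iff _).mpr hcc
    obtain ⟨c, hl⟩ : ∃ c, (s.toList.drop (p + 7)).getLast? = some c := by
      cases hl0 : (s.toList.drop (p + 7)).getLast? with
      | none => rw [hl0] at hall; simp at hall
      | some c0 => exact ⟨c0, rfl⟩
    have hmt : s.toList.drop (p + 7) ≠ [] := by
      intro h0; rw [h0] at hl; simp at hl
    obtain ⟨hA, hBv⟩ := values_unterminated s p hpre hmax heq hfc hmt
    have hstr : PySem.Chars.strip ((s.toList.drop (p + 7)).dropLast)
        = PySem.Chars.strip (s.toList.drop (p + 7)) := by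
      rw [← hA, ← hBv, heq2]
    obtain ⟨x, c', hxc⟩ : ∃ x c', s.toList.drop (p + 7) = x ++ [c'] :=
      ⟨(s.toList.drop (p + 7)).dropLast, (s.toList.drop (p + 7)).getLast hmt,
        (List.dropLast_append_getLast hmt).symm⟩
    have hcc' : c' = c := by
      rw [hxc] at hl; simpa using hl
    rw [hcc'] at hxc
    have hcws : PySem.Chars.isspace c = false := by
      rw [hl] at hall
      simpa using hall
    rw [hxc, List.dropLast_concat] at hstr
    exact strip_append_nonws x c hcws hstr.symm
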